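-- pv_equiv track=rewrite | github.com/monarch-initiative/dipper | dipper/sources/EBIGene2Phen.py | _get_consequence_predicate
-- ===== SOURCE A (Python) =====
-- def _get_consequence_predicate(consequence):
--     consequence_map = {
--         'has_molecular_consequence' : [
--             '5_prime or 3_prime UTR mutation',
--             'all missense/in frame',
--             'cis-regulatory or promotor mutation',
--             'part of contiguous gene duplication'
--         ],
--         'has_functional_consequence': [
--             'activating',
--             'dominant negative',
--             'increased gene dosage',
--             'loss of function'
--         ]
--     }
--     consequence_type = 'uncertain'
--     for typ, typ_list in consequence_map.items():
--         if consequence in typ_list: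
--             consequence_type = typ
--
--     return consequence_type
-- ===== SOURCE B (Python) =====
-- _CONSEQUENCE_TO_PREDICATE = {
--     '5_prime or 3_prime UTR mutation': 'has_molecular_consequence',
--     'all missense/in frame': 'has_molecular_consequence',
--     'cis-regulatory or promotor mutation': 'has_molecular_consequence',
--     'part of contiguous gene duplication': 'has_molecular_consequence',
--     'activating': 'has_functional_consequence',
--     'dominant negative': 'has_functional_consequence',
--     'increased gene dosage': 'has_functional_consequence',
--     'loss of function': 'has_functional_consequence',
-- }
--
-- def _get_consequence_predicate(consequence):
--     return _CONSEQUENCE_TO_PREDICATE.get(consequence, 'uncertain')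
-- ===== Notes on version B (the rewrite author's own statement) =====
-- stated objective: simpler
-- what changed: Inverted the category->list map into a flat consequence->category dict, so the result is a single dict lookup with the same default instead of a loop over categories with a list membership scan and a mutable accumulator.
import Mathlib
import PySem

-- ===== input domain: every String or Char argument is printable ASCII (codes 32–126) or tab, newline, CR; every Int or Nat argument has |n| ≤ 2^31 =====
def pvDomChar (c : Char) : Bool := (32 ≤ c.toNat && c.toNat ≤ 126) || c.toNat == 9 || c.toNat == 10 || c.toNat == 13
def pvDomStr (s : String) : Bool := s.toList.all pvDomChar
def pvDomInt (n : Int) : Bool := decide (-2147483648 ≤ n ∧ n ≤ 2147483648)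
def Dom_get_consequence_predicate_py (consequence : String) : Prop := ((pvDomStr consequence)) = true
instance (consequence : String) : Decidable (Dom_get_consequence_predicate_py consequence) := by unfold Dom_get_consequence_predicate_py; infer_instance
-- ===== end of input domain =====

-- B replaces the category->list loop with a flat consequence->category dict and a single lookup with the same default (simpler).


-- ===== PORT A =====
def get_consequence_predicate_py (consequence : String) : String :=
  let consequence_map : PySem.Dict String (List String) := PySem.Dict.ofList [
    ("has_molecular_consequence", [
      "5_prime or 3_prime UTR mutation",
      "all missense/in frame",
      "cis-regulatory or promotor mutation",
      "part of contiguous gene duplication"]),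
    ("has_functional_consequence", [
      "activating",
      "dominant negative",
      "increased gene dosage",
      "loss of function"])]
  consequence_map.items.foldl
    (fun consequence_type p => if p.2.contains consequence then p.1 else consequence_type)
    "uncertain"

-- ===== PORT B =====
-- B: the inverted flat map, one lookup with default "uncertain"
def pvFlatMap : PySem.Dict String String := PySem.Dict.ofList [
  ("5_prime or 3_prime UTR mutation", "has_molecular_consequence"),
  ("all missense/in frame", "has_molecular_consequence"),
  ("cis-regulatory or promotor mutation", "has_molecular_consequence"),
  ("part of contiguous gene duplication", "has_molecular_consequence"),
  ("activating", "has_functional_consequence"),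
  ("dominant negative", "has_functional_consequence"),
  ("increased gene dosage", "has_functional_consequence"),
  ("loss of function", "has_functional_consequence")]

def get_consequence_predicate_py_alt (consequence : String) : String :=
  pvFlatMap.getD consequence "uncertain"

-- ===== PRECONDITION & SPEC =====
def Spec_get_consequence_predicate_py (consequence : String) (out : String) : Prop := out = get_consequence_predicate_py_alt consequence
instance (consequence : String) (out : String) : Decidable (Spec_get_consequence_predicate_py consequence out) := by unfold Spec_get_consequence_predicate_py; infer_instance

-- ===== CLAIM (what is proved, stated in full; the proofs are below) =====
def Claim_equal_get_consequence_predicate_py : Prop := ∀ (consequence : String), Dom_get_consequence_predicate_py consequence → Spec_get_consequence_predicate_py consequence (get_consequence_predicate_py consequence)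

-- ===== LEMMAS AND PROOFS =====

-- ===== VERDICT (by name: the statement is the Claim_ definition above) =====
theorem get_consequence_predicate_py_spec : Claim_equal_get_consequence_predicate_py := by
  intro c _
  show get_consequence_predicate_py c = get_consequence_predicate_py_alt c
  by_cases h1 : c = "5_prime or 3_prime UTR mutation"
  · subst_vars; rfl
  by_cases h2 : c = "all missense/in frame"
  · subst_vars; rfl
  by_cases h3 : c = "cis-regulatory or promotor mutation"
  · subst_vars; rfl
  by_cases h4 : c = "part of contiguous gene duplication"
  · subst_vars; rfl
  by_cases h5 : c = "activating"
  · subst_vars; rfl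
  by_cases h6 : c = "dominant negative"
  · subst_vars; rfl
  by_cases h7 : c = "increased gene dosage"
  · subst_vars; rfl
  by_cases h8 : c = "loss of function"
  · subst_vars; rfl
  show (([("has_molecular_consequence",
            ["5_prime or 3_prime UTR mutation",
             "all missense/in frame",
             "cis-regulatory or promotor mutation",
             "part of contiguous gene duplication"]),
          ("has_functional_consequence",
            ["activating",
             "dominant negative",
             "increased gene dosage",
             "loss of function"])] : List (String × List String)).foldl
      (fun t p => if p.2.contains c then p.1 else t) "uncertain")
    = (PySem.Dict.mk [
        ("5_prime or 3_prime UTR mutation", "has_molecular_consequence"),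
        ("all missense/in frame", "has_molecular_consequence"),
        ("cis-regulatory or promotor mutation", "has_molecular_consequence"),
        ("part of contiguous gene duplication", "has_molecular_consequence"),
        ("activating", "has_functional_consequence"),
        ("dominant negative", "has_functional_consequence"),
        ("increased gene dosage", "has_functional_consequence"),
        ("loss of function", "has_functional_consequence")] : PySem.Dict String String).getD c "uncertain"
  have b1 : ("5_prime or 3_prime UTR mutation" == c) = false := by simp [Ne.symm h1]
  have b2 : ("all missense/in frame" == c) = false := by simp [Ne.symm h2]
  have b3 : ("cis-regulatory or promotor mutation" == c) = false := by simp [Ne.symm h3]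
  have b4 : ("part of contiguous gene duplication" == c) = false := by simp [Ne.symm h4]
  have b5 : ("activating" == c) = false := by simp [Ne.symm h5]
  have b6 : ("dominant negative" == c) = false := by simp [Ne.symm h6]
  have b7 : ("increased gene dosage" == c) = false := by simp [Ne.symm h7]
  have b8 : ("loss of function" == c) = false := by simp [Ne.symm h8]
  simp [List.foldl, PySem.Dict.getD_eq_get?_getD, PySem.Dict.get?, List.find?,
        h1, h2, h3, h4, h5, h6, h7, h8, b1, b2, b3, b4, b5, b6, b7, b8]
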